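-- pv_equiv track=rewrite | github.com/laurindocbenjamim/pylau-app-flask | core/authmodule/repositories/uservalidation.py | validate_form_fields
-- ===== SOURCE A (Python) =====
-- def validate_form_fields(firstname, lastname, email, country,
--             country_code, phone, password, confirm, two_factor_auth_code):
--         # Validate each field
--         if not firstname or not isinstance(firstname, str):
--             message = 'First name is required'
--             status = False
--             return status, message
--         if not lastname or not isinstance(lastname, str):
--             message = 'Last name is required'
--             status = False
--             return status, message
--         if not email or not isinstance(email, str):
--             message = 'Email is required'
--             status = False
--             return status, message
--         if not country or not isinstance(country, str):
--             message = 'Country is required'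
--             status = False
--             return status, message
--         if not country_code or not isinstance(country_code, str):
--             message = 'Country code is required'
--             status = False
--             return status, message
--         if not phone or not isinstance(phone, str):
--             message = 'Phone is required'
--             status = False
--             return status, message
--         if not two_factor_auth_code or not isinstance(two_factor_auth_code, str):
--             message = 'Two-factor authentication code is required'
--             status = False
--             return status, message
--         if not password or not isinstance(password, str):
--             message = 'Password is required'
--             status = False
--             return status, message
--         if not confirm or not isinstance(confirm, str):
--             message = 'Confirm password is required'
--             status = False
--             return status, message
--
--         # Filter unauthorized characters
--         authorized_chars = "abcdefghijklmnopqrstuvwxyzABCDEFGHIJKLMNOPQRSTUVWXYZ0123456789-_"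
--         authorized_integer = "0123456789"
--         if any(char not in authorized_chars for char in firstname):
--             message = 'Invalid characters in first name'
--             status = False
--             return status, message
--         if any(char not in authorized_chars for char in lastname):
--             message = 'Invalid characters in last name'
--             status = False
--             return status, message
--         if any(char not in authorized_chars for char in country):
--             message = 'Invalid characters in country'
--             status = False
--             return status, message
--         if any(char not in authorized_chars for char in country_code):
--             message = 'Invalid characters in country code'
--             status = False
--             return status, message
--         if any(char not in authorized_integer for char in phone):
--             message = 'Invalid characters in phone'
--             status = False
--             return status, message
--         if any(char not in authorized_chars for char in two_factor_auth_code):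
--             message = 'Invalid characters in two-factor authentication code'
--             status = False
--             return status, message
--         if any(char not in authorized_chars for char in password):
--             message = 'Invalid characters in password'
--             status = False
--             return status, message
--         if any(char not in authorized_chars for char in confirm):
--             message = 'Invalid characters in confirm password'
--             status = False
--             return status, message
-- ===== SOURCE B (Python) =====
-- def validate_form_fields(firstname, lastname, email, country,
--             country_code, phone, password, confirm, two_factor_auth_code):
--     LETTERS = frozenset("abcdefghijklmnopqrstuvwxyzABCDEFGHIJKLMNOPQRSTUVWXYZ0123456789-_")
--     DIGITS = frozenset("0123456789")
--     # one unified spec: (value, display name, allowed charset or None if no char check)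
--     spec = [
--         (firstname, 'First name', LETTERS),
--         (lastname, 'Last name', LETTERS),
--         (email, 'Email', None),
--         (country, 'Country', LETTERS),
--         (country_code, 'Country code', LETTERS),
--         (phone, 'Phone', DIGITS),
--         (two_factor_auth_code, 'Two-factor authentication code', LETTERS),
--         (password, 'Password', LETTERS),
--         (confirm, 'Confirm password', LETTERS),
--     ]
--     # eagerly collect every failing message (presence failures first, then charset
--     # failures, each in spec order), then answer with the first one
--     errors = [name + ' is required'
--               for value, name, _ in spec
--               if not value or not isinstance(value, str)]
--     errors += ['Invalid characters in ' + name[0].lower() + name[1:]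
--                for value, name, allowed in spec
--                if allowed is not None and set(value) - allowed]
--     if errors:
--         return False, errors[0]
-- ===== Notes on version B (the rewrite author's own statement) =====
-- stated objective: alternative
-- what changed: Replaces the seventeen copy-pasted if-blocks with one unified field table and two eager comprehensions that collect every failing message (presence failures first, then set-difference charset failures, messages derived by lowercasing the field name) and then answer with the first collected message instead of short-circuiting.
-- outside the precondition, e.g. on validate_form_fields('ab', 'cd', 'e@f', 'DE', '49', '123', 'pw', 'pw', '99'): A returns None, B returns None
import Mathlib
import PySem

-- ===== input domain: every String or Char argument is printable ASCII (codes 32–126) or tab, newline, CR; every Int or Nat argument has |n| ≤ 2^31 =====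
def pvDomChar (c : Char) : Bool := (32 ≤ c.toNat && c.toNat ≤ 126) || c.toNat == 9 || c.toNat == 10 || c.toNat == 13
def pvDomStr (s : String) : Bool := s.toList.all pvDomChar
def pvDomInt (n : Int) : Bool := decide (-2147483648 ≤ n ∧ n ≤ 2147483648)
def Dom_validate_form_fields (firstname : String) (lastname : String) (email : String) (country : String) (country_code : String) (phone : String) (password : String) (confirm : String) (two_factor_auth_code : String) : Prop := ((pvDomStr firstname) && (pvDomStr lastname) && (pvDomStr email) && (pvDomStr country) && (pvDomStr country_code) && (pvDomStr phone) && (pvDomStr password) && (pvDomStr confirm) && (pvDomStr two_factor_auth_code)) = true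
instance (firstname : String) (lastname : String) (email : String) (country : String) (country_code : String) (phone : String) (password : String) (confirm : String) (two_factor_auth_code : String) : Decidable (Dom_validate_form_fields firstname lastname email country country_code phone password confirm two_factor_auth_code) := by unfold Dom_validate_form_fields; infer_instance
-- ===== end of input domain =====

-- B replaces the seventeen copy-pasted if-blocks with one unified field table scanned by two eager
-- list comprehensions (presence, then set-difference charset failures, messages derived by
-- lowercasing the field name) that collect ALL failing messages and answer with the first; simpler.


-- ===== PORT A =====
def pvAuthChars : String := "abcdefghijklmnopqrstuvwxyzABCDEFGHIJKLMNOPQRSTUVWXYZ0123456789-_"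
def pvAuthInteger : String := "0123456789"
-- any(char not in allowed for char in s)  (all arguments are str, so isinstance is always True)
def pvAnyNotIn (s : String) (allowed : String) : Bool :=
  s.toList.any (fun c => !(allowed.toList.contains c))

def validate_form_fields (firstname : String) (lastname : String) (email : String) (country : String) (country_code : String) (phone : String) (password : String) (confirm : String) (two_factor_auth_code : String) : Bool × String :=
  if firstname = "" then (false, "First name is required")
  else if lastname = "" then (false, "Last name is required")
  else if email = "" then (false, "Email is required")
  else if country = "" then (false, "Country is required")
  else if country_code = "" then (false, "Country code is required")
  else if phone = "" then (false, "Phone is required")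
  else if two_factor_auth_code = "" then (false, "Two-factor authentication code is required")
  else if password = "" then (false, "Password is required")
  else if confirm = "" then (false, "Confirm password is required")
  else if pvAnyNotIn firstname pvAuthChars then (false, "Invalid characters in first name")
  else if pvAnyNotIn lastname pvAuthChars then (false, "Invalid characters in last name")
  else if pvAnyNotIn country pvAuthChars then (false, "Invalid characters in country")
  else if pvAnyNotIn country_code pvAuthChars then (false, "Invalid characters in country code")
  else if pvAnyNotIn phone pvAuthInteger then (false, "Invalid characters in phone")
  else if pvAnyNotIn two_factor_auth_code pvAuthChars then (false, "Invalid characters in two-factor authentication code")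
  else if pvAnyNotIn password pvAuthChars then (false, "Invalid characters in password")
  else if pvAnyNotIn confirm pvAuthChars then (false, "Invalid characters in confirm password")
  else (true, "")   -- unreachable under Pre_: the Python returns None (no tuple) here

-- ===== PORT B =====
-- name[0].lower() + name[1:]  (only applied to the nonempty literal field names)
def pvLowerFirst (s : String) : String :=
  match s.toList with
  | [] => ""
  | c :: rest => String.ofList (c.toLower :: rest)

def validate_form_fields_alt (firstname : String) (lastname : String) (email : String) (country : String) (country_code : String) (phone : String) (password : String) (confirm : String) (two_factor_auth_code : String) : Bool × String :=
  let LETTERS : PySem.Set Char := PySem.Set.ofList "abcdefghijklmnopqrstuvwxyzABCDEFGHIJKLMNOPQRSTUVWXYZ0123456789-_".toList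
  let DIGITS : PySem.Set Char := PySem.Set.ofList "0123456789".toList
  let spec : List (String × String × Option (PySem.Set Char)) :=
    [(firstname, "First name", some LETTERS),
     (lastname, "Last name", some LETTERS),
     (email, "Email", none),
     (country, "Country", some LETTERS),
     (country_code, "Country code", some LETTERS),
     (phone, "Phone", some DIGITS),
     (two_factor_auth_code, "Two-factor authentication code", some LETTERS),
     (password, "Password", some LETTERS),
     (confirm, "Confirm password", some LETTERS)]
  let errors : List String :=
    (spec.filterMap fun vna =>
      if vna.1 = "" then some (vna.2.1 ++ " is required") else none) ++
    (spec.filterMap fun vna =>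
      match vna.2.2 with
      | some allowed =>
          if PySem.Set.diff (PySem.Set.ofList vna.1.toList) allowed ≠ [] then
            some ("Invalid characters in " ++ pvLowerFirst vna.2.1)
          else none
      | none => none)
  match errors with
  | m :: _ => (false, m)
  | [] => (true, "")   -- unreachable under Pre_: the Python returns None here

-- ===== PRECONDITION & SPEC =====
-- Pre_ excludes exactly the fully-valid inputs, on which the Python A (and B) falls off the end
-- and returns None, which is not a value of the declared (Bool, str) result type.
def Pre_validate_form_fields (firstname : String) (lastname : String) (email : String) (country : String) (country_code : String) (phone : String) (password : String) (confirm : String) (two_factor_auth_code : String) : Prop :=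
  ¬ (firstname ≠ "" ∧ lastname ≠ "" ∧ email ≠ "" ∧ country ≠ "" ∧ country_code ≠ "" ∧
     phone ≠ "" ∧ two_factor_auth_code ≠ "" ∧ password ≠ "" ∧ confirm ≠ "" ∧
     (∀ c ∈ firstname.toList, c ∈ pvAuthChars.toList) ∧
     (∀ c ∈ lastname.toList, c ∈ pvAuthChars.toList) ∧
     (∀ c ∈ country.toList, c ∈ pvAuthChars.toList) ∧
     (∀ c ∈ country_code.toList, c ∈ pvAuthChars.toList) ∧
     (∀ c ∈ phone.toList, c ∈ pvAuthInteger.toList) ∧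
     (∀ c ∈ two_factor_auth_code.toList, c ∈ pvAuthChars.toList) ∧
     (∀ c ∈ password.toList, c ∈ pvAuthChars.toList) ∧
     (∀ c ∈ confirm.toList, c ∈ pvAuthChars.toList))
instance (firstname : String) (lastname : String) (email : String) (country : String) (country_code : String) (phone : String) (password : String) (confirm : String) (two_factor_auth_code : String) : Decidable (Pre_validate_form_fields firstname lastname email country country_code phone password confirm two_factor_auth_code) := by unfold Pre_validate_form_fields; infer_instance

def pvWitness_validate_form_fields : String × String × String × String × String × String × String × String × String :=
  ("", "", "", "", "", "", "", "", "")

def Spec_validate_form_fields (firstname : String) (lastname : String) (email : String) (country : String) (country_code : String) (phone : String) (password : String) (confirm : String) (two_factor_auth_code : String) (out : Bool × String) : Prop := out = validate_form_fields_alt firstname lastname email country country_code phone password confirm two_factor_auth_code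
instance (firstname : String) (lastname : String) (email : String) (country : String) (country_code : String) (phone : String) (password : String) (confirm : String) (two_factor_auth_code : String) (out : Bool × String) : Decidable (Spec_validate_form_fields firstname lastname email country country_code phone password confirm two_factor_auth_code out) := by unfold Spec_validate_form_fields; infer_instance

-- ===== CLAIM =====
def Claim_equal_validate_form_fields : Prop := ∀ (firstname : String) (lastname : String) (email : String) (country : String) (country_code : String) (phone : String) (password : String) (confirm : String) (two_factor_auth_code : String), Dom_validate_form_fields firstname lastname email country country_code phone password confirm two_factor_auth_code → Pre_validate_form_fields firstname lastname email country country_code phone password confirm two_factor_auth_code → Spec_validate_form_fields firstname lastname email country country_code phone password confirm two_factor_auth_code (validate_form_fields firstname lastname email country country_code phone password confirm two_factor_auth_code)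

-- ===== LEMMAS AND PROOFS =====
-- set(value) - allowed is truthy  ⇔  some char of value is outside allowed
theorem pv_diff_ne_nil (v allowed : String) :
    (PySem.Set.diff (PySem.Set.ofList v.toList) (PySem.Set.ofList allowed.toList) ≠ []) ↔
      pvAnyNotIn v allowed = true := by
  unfold pvAnyNotIn
  constructor
  · intro h
    rcases List.exists_mem_of_ne_nil _ h with ⟨c, hc⟩
    rw [PySem.Set.mem_diff, PySem.Set.mem_ofList, PySem.Set.mem_ofList] at hc
    simp only [List.any_eq_true]
    exact ⟨c, hc.1, by simpa using hc.2⟩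
  · intro h hnil
    simp only [List.any_eq_true] at h
    obtain ⟨c, hcl, hcn⟩ := h
    simp only [Bool.not_eq_true', List.contains_eq_mem, decide_eq_false_iff_not] at hcn
    have : c ∈ PySem.Set.diff (PySem.Set.ofList v.toList) (PySem.Set.ofList allowed.toList) := by
      rw [PySem.Set.mem_diff, PySem.Set.mem_ofList, PySem.Set.mem_ofList]
      exact ⟨hcl, hcn⟩
    rw [hnil] at this
    exact absurd this List.not_mem_nil


theorem pvMsgP0 : "First name" ++ " is required" = "First name is required" := rfl
theorem pvMsgP1 : "Last name" ++ " is required" = "Last name is required" := rfl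
theorem pvMsgP2 : "Email" ++ " is required" = "Email is required" := rfl
theorem pvMsgP3 : "Country" ++ " is required" = "Country is required" := rfl
theorem pvMsgP4 : "Country code" ++ " is required" = "Country code is required" := rfl
theorem pvMsgP5 : "Phone" ++ " is required" = "Phone is required" := rfl
theorem pvMsgP6 : "Two-factor authentication code" ++ " is required" = "Two-factor authentication code is required" := rfl
theorem pvMsgP7 : "Password" ++ " is required" = "Password is required" := rfl
theorem pvMsgP8 : "Confirm password" ++ " is required" = "Confirm password is required" := rfl
theorem pvMsgC0 : "Invalid characters in " ++ pvLowerFirst "First name" = "Invalid characters in first name" := rfl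
theorem pvMsgC1 : "Invalid characters in " ++ pvLowerFirst "Last name" = "Invalid characters in last name" := rfl
theorem pvMsgC2 : "Invalid characters in " ++ pvLowerFirst "Country" = "Invalid characters in country" := rfl
theorem pvMsgC3 : "Invalid characters in " ++ pvLowerFirst "Country code" = "Invalid characters in country code" := rfl
theorem pvMsgC4 : "Invalid characters in " ++ pvLowerFirst "Phone" = "Invalid characters in phone" := rfl
theorem pvMsgC5 : "Invalid characters in " ++ pvLowerFirst "Two-factor authentication code" = "Invalid characters in two-factor authentication code" := rfl
theorem pvMsgC6 : "Invalid characters in " ++ pvLowerFirst "Password" = "Invalid characters in password" := rfl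
theorem pvMsgC7 : "Invalid characters in " ++ pvLowerFirst "Confirm password" = "Invalid characters in confirm password" := rfl

-- ===== VERDICT =====
set_option maxHeartbeats 3200000 in
theorem validate_form_fields_spec : Claim_equal_validate_form_fields := by
  intro firstname lastname email country country_code phone password confirm two_factor_auth_code _ _
  unfold Spec_validate_form_fields validate_form_fields validate_form_fields_alt
  unfold pvAuthChars pvAuthInteger
  simp only [List.filterMap_cons, List.filterMap_nil]
  simp only [pv_diff_ne_nil]
  by_cases h1 : firstname = ""
  · simp [*, pvMsgP0]
  by_cases h2 : lastname = ""
  · simp [*, pvMsgP1]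
  by_cases h3 : email = ""
  · simp [*, pvMsgP2]
  by_cases h4 : country = ""
  · simp [*, pvMsgP3]
  by_cases h5 : country_code = ""
  · simp [*, pvMsgP4]
  by_cases h6 : phone = ""
  · simp [*, pvMsgP5]
  by_cases h7 : two_factor_auth_code = ""
  · simp [*, pvMsgP6]
  by_cases h8 : password = ""
  · simp [*, pvMsgP7]
  by_cases h9 : confirm = ""
  · simp [*, pvMsgP8]
  by_cases h10 : pvAnyNotIn firstname "abcdefghijklmnopqrstuvwxyzABCDEFGHIJKLMNOPQRSTUVWXYZ0123456789-_" = true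
  · simp [*, pvMsgC0]
  by_cases h11 : pvAnyNotIn lastname "abcdefghijklmnopqrstuvwxyzABCDEFGHIJKLMNOPQRSTUVWXYZ0123456789-_" = true
  · simp [*, pvMsgC1]
  by_cases h12 : pvAnyNotIn country "abcdefghijklmnopqrstuvwxyzABCDEFGHIJKLMNOPQRSTUVWXYZ0123456789-_" = true
  · simp [*, pvMsgC2]
  by_cases h13 : pvAnyNotIn country_code "abcdefghijklmnopqrstuvwxyzABCDEFGHIJKLMNOPQRSTUVWXYZ0123456789-_" = true
  · simp [*, pvMsgC3]
  by_cases h14 : pvAnyNotIn phone "0123456789" = true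
  · simp [*, pvMsgC4]
  by_cases h15 : pvAnyNotIn two_factor_auth_code "abcdefghijklmnopqrstuvwxyzABCDEFGHIJKLMNOPQRSTUVWXYZ0123456789-_" = true
  · simp [*, pvMsgC5]
  by_cases h16 : pvAnyNotIn password "abcdefghijklmnopqrstuvwxyzABCDEFGHIJKLMNOPQRSTUVWXYZ0123456789-_" = true
  · simp [*, pvMsgC6]
  by_cases h17 : pvAnyNotIn confirm "abcdefghijklmnopqrstuvwxyzABCDEFGHIJKLMNOPQRSTUVWXYZ0123456789-_" = true
  · simp [*, pvMsgC7]
  simp [*]
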